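-- pv_equiv track=rewrite | github.com/SanskritiSambyal/nhai-resource-allocation | frontend/app.py | markdown_table_to_html
-- ===== SOURCE A (Python) =====
-- def markdown_table_to_html(md_text):
--     """
--     Convert Markdown-style tables to proper HTML tables.
--     """
--     lines = md_text.split("\n")
--     html_lines = []
--     table_block = []
--
--     for line in lines + [""]:
--         if line.strip().startswith("|") and line.strip().endswith("|"):
--             table_block.append(line.strip())
--         else:
--             if table_block:
--                 headers = [h.strip() for h in table_block[0].split("|")[1:-1]]
--                 html_table = "<table><thead><tr>"
--                 for h in headers:
--                     html_table += f"<th>{h}</th>"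
--                 html_table += "</tr></thead><tbody>"
--                 for row in table_block[2:]:
--                     cells = [c.strip() for c in row.split("|")[1:-1]]
--                     html_table += "<tr>" + "".join([f"<td>{c}</td>" for c in cells]) + "</tr>"
--                 html_table += "</tbody></table>"
--                 html_lines.append(html_table)
--                 table_block = []
--             html_lines.append(line)
--     return "\n".join(html_lines)
-- ===== SOURCE B (Python) =====
-- def markdown_table_to_html(md_text):
--     def render(block):
--         headers = [h.strip() for h in block[0].split("|")[1:-1]]
--         head = "".join("<th>%s</th>" % h for h in headers)
--         body = "".join(
--             "<tr>" + "".join("<td>%s</td>" % c.strip() for c in r.split("|")[1:-1]) + "</tr>"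
--             for r in block[2:]
--         )
--         return "<table><thead><tr>" + head + "</tr></thead><tbody>" + body + "</tbody></table>"
--
--     out = []    # final output, built back-to-front (reversed at the end)
--     block = []  # pending table run just below the current line, forward order
--     for line in reversed(md_text.split("\n") + [""]):
--         s = line.strip()
--         if s.startswith("|") and s.endswith("|"):
--             block = [s] + block
--         else:
--             if block:
--                 out.append(render(block))
--                 block = []
--             out.append(line)
--     if block:
--         out.append(render(block))
--     out.reverse()
--     return "\n".join(out)
-- ===== Notes on version B (the rewrite author's own statement) =====
-- stated objective: alternative
-- what changed: B traverses the lines in REVERSE and builds the output back-to-front: a pending table run is collected from below by prepending, flushed when the non-table line above it is reached (plus one final flush), and the output list is reversed at the end; rendering uses joins instead of string +=.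
import Mathlib
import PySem

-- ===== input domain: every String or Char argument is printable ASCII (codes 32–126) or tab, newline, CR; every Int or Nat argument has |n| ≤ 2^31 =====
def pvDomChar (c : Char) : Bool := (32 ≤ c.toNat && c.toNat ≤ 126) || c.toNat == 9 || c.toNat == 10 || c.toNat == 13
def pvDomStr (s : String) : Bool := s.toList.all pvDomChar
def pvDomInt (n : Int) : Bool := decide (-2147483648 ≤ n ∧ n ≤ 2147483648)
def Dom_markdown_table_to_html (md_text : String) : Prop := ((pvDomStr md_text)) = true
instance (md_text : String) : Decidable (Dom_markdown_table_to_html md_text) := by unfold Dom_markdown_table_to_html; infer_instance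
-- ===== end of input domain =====

-- B traverses the lines in REVERSE and builds the output back-to-front (pending table run
-- collected from below, flushed at the non-table line above it, output reversed at the end);
-- same output as A's forward flush-on-non-table pass, 'alternative' objective.

-- line.strip().startswith("|") and line.strip().endswith("|")  (shared line test)
def pvIsTable (l : List Char) : Bool :=
  PySem.Chars.startswith (PySem.Chars.strip l) ['|'] &&
    PySem.Chars.endswith (PySem.Chars.strip l) ['|']

-- ===== PORT A =====
-- the body of A's `if table_block:` flush: build the <table> string by += over headers and rows
def pvRenderA (tb : List (List Char)) : List Char :=
  let headers := (PySem.List.slice (PySem.Chars.splitOn tb.headI ['|']) (some 1) (some (-1))).map PySem.Chars.strip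
  let t1 := headers.foldl (fun acc h => acc ++ "<th>".toList ++ h ++ "</th>".toList) "<table><thead><tr>".toList
  let t2 := t1 ++ "</tr></thead><tbody>".toList
  let t3 := (tb.drop 2).foldl (fun acc row =>
      acc ++ "<tr>".toList ++
        PySem.Chars.join []
          (((PySem.List.slice (PySem.Chars.splitOn row ['|']) (some 1) (some (-1))).map PySem.Chars.strip).map
            (fun c => "<td>".toList ++ c ++ "</td>".toList)) ++ "</tr>".toList) t2
  t3 ++ "</tbody></table>".toList

-- one iteration of A's `for line in lines + [""]` loop; state = (html_lines, table_block)
def pvStepA (st : List (List Char) × List (List Char)) (line : List Char) :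
    List (List Char) × List (List Char) :=
  if pvIsTable line then (st.1, st.2 ++ [PySem.Chars.strip line])
  else ((if st.2.isEmpty then st.1 else st.1 ++ [pvRenderA st.2]) ++ [line], [])

def markdown_table_to_html (md_text : String) : String :=
  let lines := PySem.Chars.splitOn md_text.toList ['\n']
  String.ofList (PySem.Chars.join ['\n'] (((lines ++ [[]]).foldl pvStepA ([], [])).1))

-- ===== PORT B =====
-- row.split("|")[1:-1]
def pvCellsB (l : List Char) : List (List Char) :=
  PySem.List.slice (PySem.Chars.splitOn l ['|']) (some 1) (some (-1))

-- B's render(block): one <table> string assembled from joins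
def pvRenderB (block : List (List Char)) : List Char :=
  let headers := (pvCellsB block.headI).map PySem.Chars.strip
  let head := PySem.Chars.join [] (headers.map (fun h => "<th>".toList ++ h ++ "</th>".toList))
  let body := PySem.Chars.join [] ((block.drop 2).map (fun r =>
      "<tr>".toList ++
        PySem.Chars.join [] ((pvCellsB r).map (fun c => "<td>".toList ++ PySem.Chars.strip c ++ "</td>".toList)) ++
        "</tr>".toList))
  "<table><thead><tr>".toList ++ head ++ "</tr></thead><tbody>".toList ++ body ++ "</tbody></table>".toList

-- one iteration of B's `for line in reversed(lines + [""])`; state = (out, block):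
-- out in python append order (reversed at the end), block prepended (forward order)
def pvStepB (st : List (List Char) × List (List Char)) (line : List Char) :
    List (List Char) × List (List Char) :=
  if pvIsTable line then (st.1, PySem.Chars.strip line :: st.2)
  else ((if st.2.isEmpty then st.1 else st.1 ++ [pvRenderB st.2]) ++ [line], [])

def markdown_table_to_html_alt (md_text : String) : String :=
  let lines := PySem.Chars.splitOn md_text.toList ['\n'] ++ [[]]
  let st := lines.reverse.foldl pvStepB ([], [])
  let out := if st.2.isEmpty then st.1 else st.1 ++ [pvRenderB st.2]
  String.ofList (PySem.Chars.join ['\n'] out.reverse)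

-- ===== PRECONDITION & SPEC =====
def Spec_markdown_table_to_html (md_text : String) (out : String) : Prop := out = markdown_table_to_html_alt md_text
instance (md_text : String) (out : String) : Decidable (Spec_markdown_table_to_html md_text out) := by unfold Spec_markdown_table_to_html; infer_instance

-- ===== CLAIM (what is proved, stated in full; the proofs are below) =====
def Claim_equal_markdown_table_to_html : Prop := ∀ (md_text : String), Dom_markdown_table_to_html md_text → Spec_markdown_table_to_html md_text (markdown_table_to_html md_text)

-- ===== LEMMAS AND PROOFS =====

-- common run-based specification both fold directions are proved equal to
def pvGoB : List (List Char) → List (List Char)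
  | [] => []
  | l :: ls =>
    if pvIsTable l then
      pvRenderB (((l :: ls).takeWhile pvIsTable).map PySem.Chars.strip) ::
        pvGoB ((l :: ls).dropWhile pvIsTable)
    else l :: pvGoB ls
termination_by ls => ls.length
decreasing_by
  · simp only [List.dropWhile_cons, *, if_true]
    have := List.length_dropWhile_le pvIsTable ls
    simp only [List.length_cons]
    omega
  · simp

lemma pv_join_nil (parts : List (List Char)) : PySem.Chars.join [] parts = parts.flatten := by
  show List.intercalate [] parts = parts.flatten
  simp [List.intercalate]
  induction parts with
  | nil => rfl
  | cons h t ih => cases t <;> simp_all [List.intersperse]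

lemma pv_render_eq (tb : List (List Char)) : pvRenderA tb = pvRenderB tb := by
  unfold pvRenderA pvRenderB pvCellsB
  simp only [pv_join_nil, List.map_map]
  simp [Function.comp_def, List.append_assoc]

lemma pvIsTable_nil : pvIsTable [] = false := by decide

lemma pv_tw_sent (ls : List (List Char)) :
    (ls ++ [([] : List Char)]).takeWhile pvIsTable = ls.takeWhile pvIsTable := by
  induction ls with
  | nil => simp [pvIsTable_nil]
  | cons l ls ih => by_cases h : pvIsTable l <;> simp_all

lemma pv_dw_sent (ls : List (List Char)) :
    (ls ++ [([] : List Char)]).dropWhile pvIsTable = ls.dropWhile pvIsTable ++ [[]] := by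
  induction ls with
  | nil => simp [pvIsTable_nil]
  | cons l ls ih => by_cases h : pvIsTable l <;> simp_all

-- A's fold equals the run-based spec (invariant over html_lines/table_block)
lemma pv_mainA (ls : List (List Char)) : ∀ (acc tb : List (List Char)),
    ((ls ++ [[]]).foldl pvStepA (acc, tb)).1 =
      if tb.isEmpty then acc ++ pvGoB (ls ++ [[]])
      else acc ++ pvRenderB (tb ++ (ls.takeWhile pvIsTable).map PySem.Chars.strip) ::
             pvGoB (ls.dropWhile pvIsTable ++ [[]]) := by
  induction ls with
  | nil =>
    intro acc tb
    by_cases h : tb.isEmpty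
    · simp [pvStepA, pvIsTable_nil, h, pvGoB]
    · simp [pvStepA, pvIsTable_nil, h, pvGoB, pv_render_eq]
  | cons l ls ih =>
    intro acc tb
    by_cases hl : pvIsTable l
    · have step : pvStepA (acc, tb) l = (acc, tb ++ [PySem.Chars.strip l]) := by
        simp [pvStepA, hl]
      have hne : (tb ++ [PySem.Chars.strip l]).isEmpty = false := by simp
      by_cases h : tb.isEmpty
      · have htb : tb = [] := by simpa [List.isEmpty_iff] using h
        subst htb
        simp only [List.cons_append, List.foldl_cons, step, ih, hne, h, if_true]
        rw [pvGoB]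
        simp [hl, pv_tw_sent, pv_dw_sent]
      · simp only [List.cons_append, List.foldl_cons, step, ih, hne, h]
        simp [hl, List.append_assoc]
    · have step : pvStepA (acc, tb) l =
          ((if tb.isEmpty then acc else acc ++ [pvRenderA tb]) ++ [l], []) := by
        simp [pvStepA, hl]
      have hemp : (([] : List (List Char))).isEmpty = true := rfl
      have hg : pvGoB (l :: (ls ++ [[]])) = l :: pvGoB (ls ++ [[]]) := by
        rw [pvGoB]; simp [hl]
      by_cases h : tb.isEmpty
      · simp only [List.cons_append, List.foldl_cons, step, h, if_true, ih, hemp]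
        simp [hg]
      · simp only [List.cons_append, List.foldl_cons, step, h, ih, hemp, if_true]
        simp [hl, hg, pv_render_eq]

-- the final flush+reverse of B's state equals the run-based spec (used twice below)
lemma pv_finalize (ls : List (List Char)) :
    (if (((ls.takeWhile pvIsTable).map PySem.Chars.strip).isEmpty) then
        (pvGoB (ls.dropWhile pvIsTable)).reverse
      else (pvGoB (ls.dropWhile pvIsTable)).reverse ++
        [pvRenderB ((ls.takeWhile pvIsTable).map PySem.Chars.strip)]).reverse = pvGoB ls := by
  cases ls with
  | nil => simp [pvGoB]
  | cons l t =>
    by_cases hl : pvIsTable l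
    · rw [pvGoB]
      simp [hl]
    · simp [hl]

-- invariant of B's reverse fold, as a foldr from the front
lemma pv_invB (ls : List (List Char)) :
    ls.foldr (fun l st => pvStepB st l) ([], []) =
      ((pvGoB (ls.dropWhile pvIsTable)).reverse, (ls.takeWhile pvIsTable).map PySem.Chars.strip) := by
  induction ls with
  | nil => simp [pvGoB]
  | cons l t ih =>
    rw [List.foldr_cons, ih]
    by_cases hl : pvIsTable l
    · simp [pvStepB, hl]
    · have h2 := congrArg List.reverse (pv_finalize t)
      simp only [List.reverse_reverse] at h2
      simp only [pvStepB, hl, Bool.false_eq_true, if_false, h2]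
      have hg : pvGoB (l :: t) = l :: pvGoB t := by rw [pvGoB]; simp [hl]
      simp [hl, hg]

-- ===== VERDICT (by name: the statement is the Claim_ definition above) =====
theorem markdown_table_to_html_spec : Claim_equal_markdown_table_to_html := by
  intro md _
  show _ = _
  unfold markdown_table_to_html markdown_table_to_html_alt
  simp only [List.foldl_reverse, pv_invB, pv_mainA, List.isEmpty_nil, if_true, List.nil_append]
  rw [pv_finalize]
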